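-- pv_equiv track=rewrite | github.com/ElephantOH/MAB-DQA | src/mab/document_hypergraph.py | _get_specific_page
-- ===== SOURCE A (Python) =====
-- from typing import List, Dict, Set
--
-- def _get_specific_page(
--
--     basis_pages: List[int],
--     target_pages: List[int]
-- ) -> Set[int]:
--     set_basis, set_target = set(basis_pages), set(target_pages)
--     new_pages = set_target - set_basis
--     improved_pages = {
--         p for p in set_basis & set_target
--         if target_pages.index(p) < basis_pages.index(p)
--     }
--     return new_pages | improved_pages
-- ===== SOURCE B (Python) =====
-- from typing import List, Set
--
-- def _get_specific_page(
--     basis_pages: List[int],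
--     target_pages: List[int]
-- ) -> Set[int]:
--     # Pages absent from basis are new; for shared pages, a lockstep scan keeps a
--     # growing set of the target prefix, so "first occurrence in target comes
--     # earlier than in basis" is just a membership test -- no index arithmetic.
--     basis_set = set(basis_pages)
--     result = {p for p in target_pages if p not in basis_set}
--     prefix = set()   # pages among target_pages[:i]
--     seen = set()     # basis pages already decided
--     for i, p in enumerate(basis_pages):
--         if p not in seen:
--             seen.add(p)
--             if p in prefix:
--                 result.add(p)
--         if i < len(target_pages):
--             prefix.add(target_pages[i])
--     return result
-- ===== Notes on version B (the rewrite author's own statement) =====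
-- stated objective: faster
-- what changed: Instead of A's set difference/intersection with a repeated list.index scan per shared page, B makes one lockstep pass over basis_pages that grows a set of the target prefix seen so far, so 'first occurrence in target comes earlier than in basis' becomes a plain membership test and no index is ever computed or compared.
import Mathlib
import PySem

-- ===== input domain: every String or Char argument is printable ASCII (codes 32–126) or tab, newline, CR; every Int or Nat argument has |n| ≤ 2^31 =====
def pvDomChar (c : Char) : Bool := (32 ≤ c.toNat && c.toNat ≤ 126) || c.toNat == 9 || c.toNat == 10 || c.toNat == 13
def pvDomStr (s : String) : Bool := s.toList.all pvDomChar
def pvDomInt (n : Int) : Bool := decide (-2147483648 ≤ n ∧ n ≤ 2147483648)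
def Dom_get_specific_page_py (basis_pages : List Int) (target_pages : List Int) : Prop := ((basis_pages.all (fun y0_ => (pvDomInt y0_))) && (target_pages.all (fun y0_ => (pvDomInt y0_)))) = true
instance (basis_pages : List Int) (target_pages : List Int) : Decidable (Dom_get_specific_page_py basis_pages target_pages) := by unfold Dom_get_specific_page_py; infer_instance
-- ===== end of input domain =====

-- B replaces A's set algebra plus repeated list.index scans by one lockstep pass over
-- the basis that grows a prefix set of the target, turning "occurs earlier in target"
-- into a membership test with no index computed (objective: faster).

-- ===== PORT A =====
-- target_pages.index(p) / basis_pages.index(p) are called only on p drawn from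
-- set_basis & set_target, where index? is `some`; `.getD 0` is exact there.
def get_specific_page_py (basis_pages : List Int) (target_pages : List Int) : List Int :=
  let set_basis := PySem.Set.ofList basis_pages
  let set_target := PySem.Set.ofList target_pages
  let new_pages := PySem.Set.diff set_target set_basis
  let improved_pages := (PySem.Set.inter set_basis set_target).filter
      (fun p => (PySem.List.index? target_pages p).getD 0 < (PySem.List.index? basis_pages p).getD 0)
  PySem.Set.union new_pages improved_pages

-- ===== PORT B =====
-- loop body of Source B's `for i, p in enumerate(basis_pages)`; state = (result, prefix, seen);
-- target_pages[i] is read only under the guard i < len(target_pages), where pyGet? is `some`,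
-- so `.getD 0` is exact there.
def altStep (target_pages : List Int) (st : List Int × List Int × List Int)
    (ip : Int × Int) : List Int × List Int × List Int :=
  let st1 := if PySem.Set.contains st.2.2 ip.2 then st
    else ((if PySem.Set.contains st.2.1 ip.2 then PySem.Set.add st.1 ip.2 else st.1),
          st.2.1, PySem.Set.add st.2.2 ip.2)
  if ip.1 < (target_pages.length : Int) then
    (st1.1, PySem.Set.add st1.2.1 ((PySem.List.pyGet? target_pages ip.1).getD 0), st1.2.2)
  else st1

def get_specific_page_py_alt (basis_pages : List Int) (target_pages : List Int) : List Int :=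
  let basis_set := PySem.Set.ofList basis_pages
  let result := PySem.Set.ofList (target_pages.filter (fun p => !(PySem.Set.contains basis_set p)))
  ((PySem.List.enumerate basis_pages).foldl (altStep target_pages)
      (result, PySem.Set.empty, PySem.Set.empty)).1

-- ===== PRECONDITION & SPEC =====
def Spec_get_specific_page_py (basis_pages : List Int) (target_pages : List Int) (out : List Int) : Prop := out = get_specific_page_py_alt basis_pages target_pages
instance (basis_pages : List Int) (target_pages : List Int) (out : List Int) : Decidable (Spec_get_specific_page_py basis_pages target_pages out) := by unfold Spec_get_specific_page_py; infer_instance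

-- ===== CLAIM (what is proved, stated in full; the proofs are below) =====
def Claim_equal_get_specific_page_py : Prop := ∀ (basis_pages : List Int) (target_pages : List Int), Dom_get_specific_page_py basis_pages target_pages → Spec_get_specific_page_py basis_pages target_pages (get_specific_page_py basis_pages target_pages)

-- ===== LEMMAS AND PROOFS =====

-- reference form of the loop's "improved" output: first basis occurrences not yet seen,
-- kept iff the page already occurs in the target prefix before that basis position
def impRec (target : List Int) : List Int → Nat → List Int → List Int
  | [], _, _ => []
  | b :: bs, s, seen =>
      if b ∈ seen then impRec target bs (s + 1) seen
      else (if b ∈ target.take s then [b] else []) ++ impRec target bs (s + 1) (seen ++ [b])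

lemma contains_eq_decide_mem (s : List Int) (p : Int) :
    PySem.Set.contains s p = decide (p ∈ s) := by
  by_cases h : p ∈ s
  · simp only [h, decide_true]
    exact (PySem.Set.contains_iff _ _).mpr h
  · simp only [h, decide_false]
    cases hc : PySem.Set.contains s p
    · rfl
    · exact absurd ((PySem.Set.contains_iff _ _).mp hc) h

lemma ofList_contains (xs : List Int) (p : Int) :
    PySem.Set.contains (PySem.Set.ofList xs) p = decide (p ∈ xs) := by
  rw [contains_eq_decide_mem]
  by_cases h : p ∈ xs
  · simp [h, (PySem.Set.mem_ofList _ _).mpr h]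
  · simp only [h, decide_false, decide_eq_false_iff_not]
    exact fun hm => h ((PySem.Set.mem_ofList _ _).mp hm)

lemma ofList_filter (xs : List Int) (q : Int → Bool) :
    PySem.Set.ofList (xs.filter q) = (PySem.Set.ofList xs).filter q := by
  induction xs with
  | nil => simp [PySem.Set.ofList_nil]
  | cons x xs ih =>
      by_cases hq : q x
      · rw [List.filter_cons_of_pos hq, PySem.Set.ofList_cons, PySem.Set.ofList_cons,
            List.filter_cons_of_pos hq, ih]
        show _ :: List.filter _ (List.filter _ _) = _ :: List.filter _ (List.filter _ _)
        congr 1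
        rw [List.filter_filter, List.filter_filter]
        apply List.filter_congr
        intro y _
        exact Bool.and_comm _ _
      · rw [List.filter_cons_of_neg hq, PySem.Set.ofList_cons,
            List.filter_cons_of_neg hq, ih]
        show List.filter _ _ = List.filter _ (List.filter _ _)
        rw [List.filter_filter]
        apply List.filter_congr
        intro y _
        by_cases hy : y = x
        · subst hy; simp [hq]
        · simp [hy]

lemma mem_take_iff_index?_lt (xs : List Int) (p : Int) (n : Nat) :
    p ∈ xs.take n ↔ ∃ k, PySem.List.index? xs p = some k ∧ k < n := by
  induction xs generalizing n with
  | nil => simp [PySem.List.index?_eq_idxOf?]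
  | cons x xs ih =>
      cases n with
      | zero => simp
      | succ m =>
          rw [List.take_succ_cons]
          by_cases hx : x = p
          · subst hx
            rw [PySem.List.index?_cons_self]
            simp
          · rw [PySem.List.index?_cons_of_ne _ hx]
            simp only [List.mem_cons, Ne.symm hx, false_or]
            rw [ih]
            rcases hi : PySem.List.index? xs p with _ | k'
            · constructor
              · rintro ⟨k, hk, _⟩; cases hk
              · rintro ⟨k, hk, _⟩; simp at hk
            · constructor
              · rintro ⟨k, hk, hkm⟩
                cases hk
                exact ⟨k' + 1, by simp, by omega⟩
              · rintro ⟨k, hk, hkm⟩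
                simp at hk
                subst hk
                exact ⟨k', rfl, by omega⟩

lemma pref_update (target : List Int) (s : Nat) :
    (if ((s : Int)) < (target.length : Int)
      then PySem.Set.add (PySem.Set.ofList (target.take s))
             ((PySem.List.pyGet? target (s : Int)).getD 0)
      else PySem.Set.ofList (target.take s))
    = PySem.Set.ofList (target.take (s + 1)) := by
  by_cases hs : s < target.length
  · rw [if_pos (by exact_mod_cast hs)]
    rw [PySem.List.pyGet?_natCast, List.getElem?_eq_getElem hs]
    rw [List.take_add_one, List.getElem?_eq_getElem hs]
    simp only [Option.toList_some, Option.getD_some]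
    rw [PySem.Set.ofList_append_singleton]
  · rw [if_neg (by exact_mod_cast hs)]
    rw [List.take_of_length_le (by omega), List.take_of_length_le (by omega)]

lemma step_eq (target : List Int) (s : Nat) (r seen : List Int) (b : Int) :
    altStep target (r, PySem.Set.ofList (target.take s), seen) ((s : Int), b)
      = ((if b ∈ seen then r else if b ∈ target.take s then PySem.Set.add r b else r),
         PySem.Set.ofList (target.take (s + 1)),
         (if b ∈ seen then seen else seen ++ [b])) := by
  by_cases hseen : b ∈ seen
  · simp only [altStep, contains_eq_decide_mem, hseen, decide_true, if_pos]
    rw [← pref_update target s]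
    split <;> rfl
  · have hnot : PySem.Set.add seen b = seen ++ [b] := PySem.Set.add_of_not_mem hseen
    simp only [altStep, contains_eq_decide_mem, hseen, decide_false, Bool.false_eq_true,
      if_false, hnot]
    rw [← pref_update target s]
    by_cases hp : b ∈ target.take s
    · simp only [PySem.Set.mem_ofList, hp, decide_true, if_pos]
      split <;> rfl
    · simp only [PySem.Set.mem_ofList, hp, decide_false, Bool.false_eq_true, if_false]
      split <;> rfl

lemma loop_spec (target : List Int) (bs : List Int) (s : Nat) (r seen : List Int)
    (h : ∀ p ∈ bs, p ∉ seen → p ∉ r) :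
    ((PySem.List.enumerate bs (s : Int)).foldl (altStep target)
        (r, PySem.Set.ofList (target.take s), seen)).1
      = r ++ impRec target bs s seen := by
  induction bs generalizing s r seen with
  | nil => simp [PySem.List.enumerate_nil, impRec]
  | cons b bs ih =>
      rw [PySem.List.enumerate_cons, List.foldl_cons, step_eq]
      have hcast : (s : Int) + 1 = ((s + 1 : Nat) : Int) := by push_cast; ring
      rw [hcast]
      by_cases hseen : b ∈ seen
      · simp only [if_pos hseen]
        rw [ih (s + 1) r seen (fun p hp => h p (List.mem_cons_of_mem _ hp))]
        simp [impRec, hseen]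
      · simp only [if_neg hseen]
        by_cases hp : b ∈ target.take s
        · have hbr : b ∉ r := h b List.mem_cons_self hseen
          have h1 : ∀ p ∈ bs, p ∉ seen ++ [b] → p ∉ r ++ [b] := by
            intro p hpbs hns
            simp only [List.mem_append, List.mem_singleton, not_or] at hns
            have := h p (List.mem_cons_of_mem _ hpbs) hns.1
            simp [List.mem_append, this, hns.2]
          rw [if_pos hp, PySem.Set.add_of_not_mem hbr]
          rw [ih (s + 1) (r ++ [b]) (seen ++ [b]) h1]
          simp [impRec, hseen, hp]
        · have h2 : ∀ p ∈ bs, p ∉ seen ++ [b] → p ∉ r := by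
            intro p hpbs hns
            simp only [List.mem_append, List.mem_singleton, not_or] at hns
            exact h p (List.mem_cons_of_mem _ hpbs) hns.1
          rw [if_neg hp]
          rw [ih (s + 1) r (seen ++ [b]) h2]
          simp [impRec, hseen, hp]

lemma impRec_eq (target : List Int) (bs : List Int) (s : Nat) (seen : List Int) :
    impRec target bs s seen
      = (PySem.Set.ofList bs).filter
          (fun p => decide (p ∉ seen) && decide (p ∈ target.take (s + (PySem.List.index? bs p).getD 0))) := by
  induction bs generalizing s seen with
  | nil => simp [impRec, PySem.Set.ofList_nil]
  | cons b bs ih =>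
      rw [PySem.Set.ofList_cons]
      show impRec target (b :: bs) s seen
        = List.filter _ (b :: List.filter (fun y => !y == b) (PySem.Set.ofList bs))
      rw [List.filter_cons, List.filter_filter]
      by_cases hseen : b ∈ seen
      · rw [if_neg (by simp [hseen])]
        show impRec target (b :: bs) s seen = _
        rw [impRec, if_pos hseen, ih (s + 1) seen]
        apply List.filter_congr
        intro p hp
        by_cases hpb : p = b
        · subst hpb; simp [hseen]
        · have : PySem.List.index? (b :: bs) p = (PySem.List.index? bs p).map (· + 1) :=
            PySem.List.index?_cons_of_ne _ (fun h => hpb h.symm)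
          rw [this]
          have hpmem : p ∈ bs := (PySem.Set.mem_ofList _ _).mp hp
          obtain ⟨k, hk⟩ := Option.isSome_iff_exists.mp ((PySem.List.index?_isSome_iff bs p).mpr hpmem)
          rw [hk]
          simp only [Option.map_some, Option.getD_some]
          simp only [show s + 1 + k = s + (k + 1) from by omega]
          have hbe : (p == b) = false := beq_eq_false_iff_ne.mpr hpb
          cases hps : decide (p ∈ seen) <;> simp [hps, hbe]
      · rw [impRec, if_neg hseen, ih (s + 1) (seen ++ [b])]
        have hhead : (decide (b ∉ seen) && decide (b ∈ target.take (s + (PySem.List.index? (b :: bs) b).getD 0)))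
            = decide (b ∈ target.take s) := by
          rw [PySem.List.index?_cons_self]
          simp [hseen]
        rw [hhead]
        have htail : List.filter
              (fun p => decide (p ∉ seen ++ [b]) && decide (p ∈ target.take (s + 1 + (PySem.List.index? bs p).getD 0)))
              (PySem.Set.ofList bs)
            = List.filter
              (fun y => (decide (y ∉ seen) && decide (y ∈ target.take (s + (PySem.List.index? (b :: bs) y).getD 0))) && !y == b)
              (PySem.Set.ofList bs) := by
          apply List.filter_congr
          intro p hp
          by_cases hpb : p = b
          · subst hpb; simp
          · have hidx : PySem.List.index? (b :: bs) p = (PySem.List.index? bs p).map (· + 1) :=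
              PySem.List.index?_cons_of_ne _ (fun h => hpb h.symm)
            rw [hidx]
            have hpmem : p ∈ bs := (PySem.Set.mem_ofList _ _).mp hp
            obtain ⟨k, hk⟩ := Option.isSome_iff_exists.mp ((PySem.List.index?_isSome_iff bs p).mpr hpmem)
            rw [hk]
            simp only [Option.map_some, Option.getD_some, show s + 1 + k = s + (k + 1) from by omega, List.mem_append,
              List.mem_singleton, not_or]
            have hbe : (p == b) = false := beq_eq_false_iff_ne.mpr hpb
            cases hps : decide (¬ p ∈ seen) <;> simp [hps, hbe] <;> simp_all
        rw [htail]
        by_cases hp : b ∈ target.take s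
        · simp [hp]
        · simp [hp]

lemma imp_final (basis_pages target_pages : List Int) :
    impRec target_pages basis_pages 0 []
      = (PySem.Set.inter (PySem.Set.ofList basis_pages) (PySem.Set.ofList target_pages)).filter
          (fun p => decide ((PySem.List.index? target_pages p).getD 0
                           < (PySem.List.index? basis_pages p).getD 0)) := by
  rw [impRec_eq]
  show _ = List.filter _
      (List.filter (fun x => PySem.Set.contains (PySem.Set.ofList target_pages) x)
        (PySem.Set.ofList basis_pages))
  rw [List.filter_filter]
  apply List.filter_congr
  intro p hp
  have hpb : p ∈ basis_pages := (PySem.Set.mem_ofList _ _).mp hp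
  obtain ⟨kb, hkb⟩ := Option.isSome_iff_exists.mp ((PySem.List.index?_isSome_iff basis_pages p).mpr hpb)
  rw [hkb, ofList_contains]
  simp only [List.not_mem_nil, not_false_eq_true, decide_true, Bool.true_and, Nat.zero_add,
    Option.getD_some]
  by_cases ht : p ∈ target_pages
  · obtain ⟨kt, hkt⟩ := Option.isSome_iff_exists.mp ((PySem.List.index?_isSome_iff target_pages p).mpr ht)
    have hiff : p ∈ target_pages.take kb ↔ kt < kb := by
      rw [mem_take_iff_index?_lt]
      constructor
      · rintro ⟨k, hk, hlt⟩
        rw [hkt] at hk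
        cases hk
        exact hlt
      · intro hlt
        exact ⟨kt, hkt, hlt⟩
    rw [hkt]
    simp [hiff, ht]
  · have hnt : p ∉ target_pages.take kb := fun hm => ht (List.mem_of_mem_take hm)
    simp [ht, hnt]

lemma portA_eq_portB (basis_pages target_pages : List Int) :
    get_specific_page_py basis_pages target_pages
      = get_specific_page_py_alt basis_pages target_pages := by
  unfold get_specific_page_py get_specific_page_py_alt
  dsimp only
  -- B side: new pages, then the loop
  set q : Int → Bool := fun p => !(PySem.Set.contains (PySem.Set.ofList basis_pages) p) with hq
  have hnewB : PySem.Set.ofList (target_pages.filter q) = (PySem.Set.ofList target_pages).filter q :=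
    ofList_filter _ _
  have hr : ∀ p ∈ basis_pages, p ∉ ([] : List Int) →
      p ∉ PySem.Set.ofList (target_pages.filter q) := by
    intro p hpb _ hm
    have := (List.mem_filter.mp ((PySem.Set.mem_ofList _ _).mp hm)).2
    rw [hq] at this
    simp only [ofList_contains, hpb, decide_true, Bool.not_true] at this
    cases this
  have hloop := loop_spec target_pages basis_pages 0
      (PySem.Set.ofList (target_pages.filter q)) [] (hr)
  simp only [Nat.cast_zero, List.take_zero] at hloop
  have hloop2 : ((PySem.List.enumerate basis_pages).foldl (altStep target_pages)
      (PySem.Set.ofList (target_pages.filter q), PySem.Set.empty, PySem.Set.empty)).1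
      = PySem.Set.ofList (target_pages.filter q) ++ impRec target_pages basis_pages 0 [] := hloop
  rw [hloop2, imp_final, hnewB]
  -- A side: union = append, by disjointness
  set newP := PySem.Set.diff (PySem.Set.ofList target_pages) (PySem.Set.ofList basis_pages) with hnew
  set impP := (PySem.Set.inter (PySem.Set.ofList basis_pages) (PySem.Set.ofList target_pages)).filter
      (fun p => decide ((PySem.List.index? target_pages p).getD 0
                       < (PySem.List.index? basis_pages p).getD 0)) with himp
  have hnewEq : (PySem.Set.ofList target_pages).filter q = newP := by
    rw [hnew]
    rfl
  rw [hnewEq]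
  have hnodup_imp : impP.Nodup := by
    rw [himp]
    exact List.Nodup.filter _
      (PySem.Set.nodup_inter (PySem.Set.ofList basis_pages) (PySem.Set.ofList target_pages)
        (PySem.Set.nodup_ofList basis_pages))
  have hdisj : ∀ x ∈ impP, x ∉ newP := by
    intro x hx hxn
    have hxb : x ∈ basis_pages := by
      rw [himp] at hx
      have := (List.mem_filter.mp hx).1
      exact (PySem.Set.mem_ofList _ _).mp (List.mem_filter.mp this).1
    rw [hnew] at hxn
    have hcf := (List.mem_filter.mp hxn).2
    rw [ofList_contains] at hcf
    simp [hxb] at hcf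
  show PySem.Set.update newP impP = newP ++ impP
  exact PySem.Set.update_eq_append_of_disjoint newP impP hnodup_imp hdisj

-- ===== VERDICT (by name: the statement is the Claim_ definition above) =====
theorem get_specific_page_py_spec : Claim_equal_get_specific_page_py := by
  intro basis_pages target_pages _
  unfold Spec_get_specific_page_py
  exact portA_eq_portB basis_pages target_pages
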